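-- pv_equiv track=rewrite | github.com/keenanpepper/self-ablating-transformers | graph_utils.py | sentence_tokenizer
-- ===== SOURCE A (Python) =====
-- from collections import defaultdict
-- from collections import defaultdict
-- from typing import List, Dict, Tuple, Optional
--
-- def sentence_tokenizer(str_tokens: List[str]) -> Tuple[List[List[str]], Dict[int, List[int]], Dict[int, int]]:
--     """Split tokenized text into sentences using tiktoken tokens
--
--     Args:
--         str_tokens: List of string tokens from tiktoken
--
--     Returns:
--         sentences: List of lists, where each inner list contains tokens for one sentence
--         sentence_to_token_indices: Maps sentence index to list of token indices
--         token_to_sentence_indices: Maps token index to sentence index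
--     """
--     # Define sentence boundary tokens/patterns
--     boundary_patterns = [
--         '\n', '.', '!', '?',  # Basic sentence endings
--         ' .',  # Tiktoken often separates period as ' .'
--         '."', '!"', '?"'  # Quote endings
--     ]
--
--     sentences = []
--     sentence = []
--     sentence_to_token_indices = defaultdict(list)
--     token_to_sentence_indices = {}
--
--     for i, token in enumerate(str_tokens):
--         # Add token to current sentence
--         sentence.append(token)
--         sentence_to_token_indices[len(sentences)].append(i)
--         token_to_sentence_indices[i] = len(sentences)
--
--         # Check if token marks sentence boundary
--         is_boundary = any(pattern in token for pattern in boundary_patterns)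
--         is_last_token = (i + 1 == len(str_tokens))
--
--         if is_boundary or is_last_token:
--             sentences.append(sentence)
--             sentence = []
--
--     # Handle any remaining tokens
--     if sentence:
--         sentences.append(sentence)
--
--     return sentences, sentence_to_token_indices, token_to_sentence_indices
-- ===== SOURCE B (Python) =====
-- from collections import defaultdict
--
--
-- def sentence_tokenizer(str_tokens):
--     """Two-pass grouping: first assign each token a sentence id, then group by id."""
--     boundary_chars = '\n.!?'
--
--     # Pass 1: assign each token index its sentence id.
--     token_to_sentence_indices = {}
--     sid = 0
--     for i, token in enumerate(str_tokens):
--         token_to_sentence_indices[i] = sid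
--         if any(c in token for c in boundary_chars):
--             sid += 1
--
--     # Pass 2: reconstruct the sentences by grouping tokens by their id.
--     sentences = []
--     sentence_to_token_indices = defaultdict(list)
--     for i, token in enumerate(str_tokens):
--         sid = token_to_sentence_indices[i]
--         if sid == len(sentences):
--             sentences.append([])
--         sentences[sid].append(token)
--         sentence_to_token_indices[sid].append(i)
--
--     return sentences, sentence_to_token_indices, token_to_sentence_indices
-- ===== Notes on version B (the rewrite author's own statement) =====
-- stated objective: alternative
-- what changed: Replaced A's single stateful loop (growing the current sentence and flushing it at boundaries) by a two-pass grouping: pass 1 assigns every token a sentence id (incremented after boundary tokens), pass 2 groups tokens and indices by that id.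
import Mathlib
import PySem

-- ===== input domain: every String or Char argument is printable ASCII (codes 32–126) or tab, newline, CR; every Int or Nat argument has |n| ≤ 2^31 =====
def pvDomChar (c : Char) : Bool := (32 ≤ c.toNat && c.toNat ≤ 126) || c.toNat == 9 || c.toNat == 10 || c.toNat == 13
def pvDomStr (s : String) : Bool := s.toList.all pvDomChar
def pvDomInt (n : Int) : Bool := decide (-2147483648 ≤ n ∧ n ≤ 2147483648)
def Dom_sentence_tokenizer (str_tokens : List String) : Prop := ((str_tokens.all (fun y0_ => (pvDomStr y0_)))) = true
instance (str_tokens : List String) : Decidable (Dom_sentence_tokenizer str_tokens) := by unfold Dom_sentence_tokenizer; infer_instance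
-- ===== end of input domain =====

-- B replaces A's single stateful loop by two passes: assign each token a sentence id, then group by id; objective: alternative decomposition (same cost).

-- ===== PORT A =====
def boundary_patterns : List String := ["\n", ".", "!", "?", " .", ".\"", "!\"", "?\""]

def sentence_tokenizer_goA (toks : List String) (i n : Int)
    (sentences : List (List String)) (sentence : List String)
    (s2t : PySem.Dict Int (List Int)) (t2s : PySem.Dict Int Int) :
    List (List String) × PySem.Dict Int (List Int) × PySem.Dict Int Int :=
  match toks with
  | [] => (if sentence.isEmpty then sentences else sentences ++ [sentence], s2t, t2s)
  | t :: rest =>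
    let sentence' := sentence ++ [t]
    let s2t' := s2t.modify (PySem.List.len sentences) [] (· ++ [i])
    let t2s' := t2s.insert i (PySem.List.len sentences)
    let is_boundary := boundary_patterns.any (fun p => PySem.Str.isIn p t)
    let is_last := (i + 1 == n)
    if is_boundary || is_last then
      sentence_tokenizer_goA rest (i + 1) n (sentences ++ [sentence']) [] s2t' t2s'
    else
      sentence_tokenizer_goA rest (i + 1) n sentences sentence' s2t' t2s'

def sentence_tokenizer (str_tokens : List String) : List (List String) × (List (Int × List Int)) × (List (Int × Int)) :=
  let r := sentence_tokenizer_goA str_tokens 0 (PySem.List.len str_tokens) [] [] PySem.Dict.empty PySem.Dict.empty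
  (r.1, r.2.1.items, r.2.2.items)

-- ===== PORT B =====
def boundaryB (t : String) : Bool := "\n.!?".toList.any (fun c => PySem.Chars.isIn [c] t.toList)

-- pass 1: token index -> sentence id
def sentence_tokenizer_goB1 (toks : List String) (i : Int) (t2s : PySem.Dict Int Int) (sid : Int) :
    PySem.Dict Int Int :=
  match toks with
  | [] => t2s
  | t :: rest =>
    sentence_tokenizer_goB1 rest (i + 1) (t2s.insert i sid) (if boundaryB t then sid + 1 else sid)

-- pass 2: group tokens by their sentence id
def sentence_tokenizer_goB2 (toks : List String) (i : Int) (t2s : PySem.Dict Int Int)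
    (sentences : List (List String)) (s2t : PySem.Dict Int (List Int)) :
    List (List String) × PySem.Dict Int (List Int) :=
  match toks with
  | [] => (sentences, s2t)
  | t :: rest =>
    let sid := t2s.getD i 0
    let sentences1 := if sid == PySem.List.len sentences then sentences ++ [[]] else sentences
    let sentences2 := PySem.List.pySetD sentences1 sid (PySem.List.pyGetD sentences1 sid [] ++ [t])
    sentence_tokenizer_goB2 rest (i + 1) t2s sentences2 (s2t.modify sid [] (· ++ [i]))

def sentence_tokenizer_alt (str_tokens : List String) : List (List String) × (List (Int × List Int)) × (List (Int × Int)) :=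
  let t2s := sentence_tokenizer_goB1 str_tokens 0 PySem.Dict.empty 0
  let r := sentence_tokenizer_goB2 str_tokens 0 t2s [] PySem.Dict.empty
  (r.1, r.2.items, t2s.items)

-- ===== PRECONDITION & SPEC =====
def Spec_sentence_tokenizer (str_tokens : List String) (out : List (List String) × (List (Int × List Int)) × (List (Int × Int))) : Prop := out = sentence_tokenizer_alt str_tokens
instance (str_tokens : List String) (out : List (List String) × (List (Int × List Int)) × (List (Int × Int))) : Decidable (Spec_sentence_tokenizer str_tokens out) := by unfold Spec_sentence_tokenizer; infer_instance

-- ===== CLAIM (what is proved, stated in full; the proofs are below) =====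
def Claim_equal_sentence_tokenizer : Prop := ∀ (str_tokens : List String), Dom_sentence_tokenizer str_tokens → Spec_sentence_tokenizer str_tokens (sentence_tokenizer str_tokens)

-- ===== LEMMAS AND PROOFS =====

-- the 8-pattern test of A equals the 4-character test of B
lemma boundary_eq (t : String) : boundary_patterns.any (fun p => PySem.Str.isIn p t) = boundaryB t := by
  have step : ∀ (a b : List Char), a <:+: b →
      PySem.Chars.isIn b t.toList = true → PySem.Chars.isIn a t.toList = true := by
    intro a b hab hb
    rw [PySem.Chars.isIn_iff_infix] at hb ⊢
    exact hab.trans hb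
  have hL : "\n.!?".toList = ['\n', '.', '!', '?'] := by decide
  have e1 : "\n".toList = ['\n'] := by decide
  have e2 : ".".toList = ['.'] := by decide
  have e3 : "!".toList = ['!'] := by decide
  have e4 : "?".toList = ['?'] := by decide
  have e5 : " .".toList = [' ', '.'] := by decide
  have e6 : ".\"".toList = ['.', '\"'] := by decide
  have e7 : "!\"".toList = ['!', '\"'] := by decide
  have e8 : "?\"".toList = ['?', '\"'] := by decide
  have hP1 := step ['.'] [' ', '.'] (by decide)
  have hP2 := step ['.'] ['.', '\"'] (by decide)
  have hP3 := step ['!'] ['!', '\"'] (by decide)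
  have hP4 := step ['?'] ['?', '\"'] (by decide)
  simp only [boundary_patterns, boundaryB, List.any_cons, List.any_nil, Bool.or_false,
    PySem.Str.isIn_eq, hL, e1, e2, e3, e4, e5, e6, e7, e8]
  cases a1 : PySem.Chars.isIn ['\n'] t.toList <;>
  cases a2 : PySem.Chars.isIn ['.'] t.toList <;>
  cases a3 : PySem.Chars.isIn ['!'] t.toList <;>
  cases a4 : PySem.Chars.isIn ['?'] t.toList <;>
    simp_all

def countB (l : List String) : Int := (l.countP boundaryB : Int)

lemma goB1_lt (toks : List String) (i : Int) (t2s : PySem.Dict Int Int) (sid k : Int) (hk : k < i) :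
    (sentence_tokenizer_goB1 toks i t2s sid).getD k 0 = t2s.getD k 0 := by
  induction toks generalizing i t2s sid with
  | nil => rfl
  | cons t rest ih =>
    rw [sentence_tokenizer_goB1, ih _ _ _ (by omega),
        PySem.Dict.getD_insert_of_ne _ _ _ (by omega)]

lemma goB1_getD (toks : List String) (j : Nat) (i : Int) (t2s : PySem.Dict Int Int) (sid : Int)
    (hj : j < toks.length) :
    (sentence_tokenizer_goB1 toks i t2s sid).getD (i + j) 0 = sid + countB (toks.take j) := by
  induction toks generalizing j i t2s sid with
  | nil => simp at hj
  | cons t rest ih =>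
    rw [sentence_tokenizer_goB1]
    cases j with
    | zero =>
      rw [goB1_lt _ _ _ _ _ (by omega)]
      simp [PySem.Dict.getD_insert_self, countB]
    | succ j' =>
      have : i + ((j' : Int) + 1) = (i + 1) + j' := by omega
      push_cast
      rw [this, ih j' (i+1) _ _ (by simpa using hj)]
      simp [countB, List.countP_cons]
      by_cases hb : boundaryB t = true <;> simp [hb] <;> omega

lemma pySetD_append_singleton {α : Type} (pre : List α) (y v : α) :
    PySem.List.pySetD (pre ++ [y]) (pre.length : Int) v = pre ++ [v] := by
  simp [PySem.List.pySetD, PySem.List.pySet?, PySem.List.pyIdx?]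

lemma pyGetD_append_singleton {α : Type} (pre : List α) (y d : α) :
    PySem.List.pyGetD (pre ++ [y]) (pre.length : Int) d = y := by
  simp [pysem]

lemma countB_cons (t : String) (l : List String) :
    countB (t :: l) = (if boundaryB t then 1 else 0) + countB l := by
  simp [countB, List.countP_cons]; by_cases hb : boundaryB t = true <;> simp [hb] <;> omega

lemma master (toks : List String) (i : Int)
    (sentences : List (List String)) (cur : List String)
    (s2t : PySem.Dict Int (List Int)) (t2s : PySem.Dict Int Int) (D : PySem.Dict Int Int)
    (HD : ∀ j : Nat, j < toks.length → D.getD (i + j) 0 = (sentences.length : Int) + countB (toks.take j)) :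
    sentence_tokenizer_goA toks i (i + toks.length) sentences cur s2t t2s =
      ((sentence_tokenizer_goB2 toks i D (sentences ++ if cur.isEmpty then [] else [cur]) s2t).1,
       (sentence_tokenizer_goB2 toks i D (sentences ++ if cur.isEmpty then [] else [cur]) s2t).2,
       sentence_tokenizer_goB1 toks i t2s (sentences.length : Int)) := by
  induction toks generalizing i sentences cur s2t t2s with
  | nil =>
    by_cases hc : cur.isEmpty <;>
      simp_all [sentence_tokenizer_goA, sentence_tokenizer_goB1, sentence_tokenizer_goB2,
        List.isEmpty_iff]
  | cons t rest ih =>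
    have hsid : D.getD i 0 = (sentences.length : Int) := by
      have := HD 0 (by simp)
      simpa [countB] using this
    have hbd := boundary_eq t
    have hcur' : (cur ++ [t]).isEmpty = false := by simp
    rw [sentence_tokenizer_goA, sentence_tokenizer_goB2, sentence_tokenizer_goB1]
    simp only [hsid, hbd, PySem.List.len_eq]
    have hS1 : (if ((sentences.length : Int) == ((sentences ++ if cur.isEmpty = true then [] else [cur]).length : Int)) = true
          then (sentences ++ if cur.isEmpty = true then [] else [cur]) ++ [[]]
          else sentences ++ if cur.isEmpty = true then [] else [cur]) = sentences ++ [cur] := by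
      by_cases hc : cur.isEmpty
      · have : cur = [] := List.isEmpty_iff.mp hc
        subst this
        simp
      · have hcond : (((sentences.length : Int)) == ((sentences ++ if cur.isEmpty = true then [] else [cur]).length : Int)) = false := by
          simp [hc]
        simp [hcond, hc]
    rw [hS1, pyGetD_append_singleton, pySetD_append_singleton]
    have hn : i + ((t :: rest).length : Int) = (i + 1) + (rest.length : Int) := by
      simp only [List.length_cons]; push_cast; omega
    rw [hn]
    by_cases hb : boundaryB t = true
    · -- boundary token: A closes the current sentence here
      have HD' : ∀ j : Nat, j < rest.length →
          D.getD ((i + 1) + j) 0 = ((sentences ++ [cur ++ [t]]).length : Int) + countB (rest.take j) := by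
        intro j hj
        have h0 := HD (j + 1) (by simpa using Nat.succ_lt_succ hj)
        have harg : i + ((j + 1 : Nat) : Int) = (i + 1) + (j : Int) := by push_cast; omega
        rw [harg] at h0
        rw [h0]
        simp [List.take_succ_cons, countB_cons, hb]
        push_cast; omega
      have hIH := ih (i + 1) (sentences ++ [cur ++ [t]]) []
        (s2t.modify (sentences.length : Int) [] (· ++ [i]))
        (t2s.insert i (sentences.length : Int)) HD'
      simp only [List.isEmpty_nil, if_true, List.append_nil, List.length_append,
        List.length_cons, List.length_nil, Nat.add_zero, Nat.zero_add] at hIH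
      simp only [hb, Bool.true_or, if_true]
      rw [hIH]
      have : ((sentences.length + 1 : Nat) : Int) = (sentences.length : Int) + 1 := by push_cast; omega
      rw [this]
    · -- not a boundary token
      have hbf : boundaryB t = false := Bool.eq_false_iff.mpr hb
      by_cases hrest : rest = []
      · subst hrest
        have hlast : ((i + 1 == i + 1 + ((List.length ([] : List String)) : Int))) = true := by
          simp
        simp [sentence_tokenizer_goA, sentence_tokenizer_goB1, sentence_tokenizer_goB2,
          hbf, hlast]
      · have hfalse : ((i + 1 == i + 1 + ((rest.length) : Int))) = false := by
          have : rest.length ≠ 0 := by simpa using hrest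
          simp [beq_iff_eq]
          omega
        have HD' : ∀ j : Nat, j < rest.length →
            D.getD ((i + 1) + j) 0 = (sentences.length : Int) + countB (rest.take j) := by
          intro j hj
          have h0 := HD (j + 1) (by simpa using Nat.succ_lt_succ hj)
          have harg : i + ((j + 1 : Nat) : Int) = (i + 1) + (j : Int) := by push_cast; omega
          rw [harg] at h0
          rw [h0]
          simp [List.take_succ_cons, countB_cons, hbf]
        have hIH := ih (i + 1) sentences (cur ++ [t])
          (s2t.modify (sentences.length : Int) [] (· ++ [i]))
          (t2s.insert i (sentences.length : Int)) HD'
        simp only [hcur', if_false, Bool.false_eq_true] at hIH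
        simp only [hbf, hfalse, Bool.false_or, Bool.or_false, if_false, Bool.false_eq_true]
        exact hIH

-- ===== VERDICT (by name: the statement is the Claim_ definition above) =====
theorem sentence_tokenizer_spec : Claim_equal_sentence_tokenizer := by
  intro toks _
  unfold Spec_sentence_tokenizer sentence_tokenizer sentence_tokenizer_alt
  have HD : ∀ j : Nat, j < toks.length →
      (sentence_tokenizer_goB1 toks 0 PySem.Dict.empty 0).getD ((0:Int) + j) 0
        = (([] : List (List String)).length : Int) + countB (toks.take j) := by
    intro j hj
    simpa using goB1_getD toks j 0 PySem.Dict.empty 0 hj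
  have h := master toks 0 [] [] PySem.Dict.empty PySem.Dict.empty
      (sentence_tokenizer_goB1 toks 0 PySem.Dict.empty 0) HD
  simp only [zero_add, List.isEmpty_nil, if_true, List.append_nil, List.nil_append,
    List.length_nil, Int.natCast_zero] at h
  simp only [PySem.List.len_eq]
  rw [h]
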